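-- pv_equiv track=rewrite | github.com/vaishnavipawar09/Applied-Algorithms | Lab/LAB10-VaishnaviP.py | makeTunnels
-- ===== SOURCE A (Python) =====
-- def usingdfs(currnode, graph_network, visitednode):
--     visitednode.add(currnode)  # to mark that curr node has been visited
--     for neighbor in graph_network[currnode]:  # call all the nodes
--         if neighbor not in visitednode:  # if not visited visit them
--             usingdfs(neighbor, graph_network, visitednode)
--
-- def makeTunnels(n, tunnels):
--     # dictionary is used that represents graph
--     graph = {i: [] for i in range(n)}
--     for ai, bi in tunnels:  # making it bi directional tunnel
--         graph[ai].append(bi)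
--         graph[bi].append(ai)
--
--     visited = set()
--     components = 0  # count the number of connected components
--     for ctr in range(n):
--         if ctr not in visited:
--             usingdfs(ctr, graph, visited)
--             components += 1
--
--     moreTunnels = components - 1  # for finding minimum tunnels we need
--
--     if len(tunnels) < n - 1:  # if the condition of minimum tunnels is not satisfied
--         return -1
--
--     return moreTunnels
-- ===== SOURCE B (Python) =====
-- def makeTunnels(n, tunnels):
--     # quick-find union: label[i] is the current component label of node i
--     label = list(range(n))
--     for a, b in tunnels:
--         la, lb = label[a], label[b]
--         if la != lb:
--             label = [la if x == lb else x for x in label]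
--     components = len(set(label))
--     if len(tunnels) < n - 1:
--         return -1
--     return components - 1
-- ===== Notes on version B (the rewrite author's own statement) =====
-- stated objective: alternative
-- what changed: Replaces the dict-of-adjacency-lists plus recursive DFS component count by a quick-find union structure: a label array merged edge by edge, with the component count read off as the number of distinct labels.
import Mathlib
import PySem

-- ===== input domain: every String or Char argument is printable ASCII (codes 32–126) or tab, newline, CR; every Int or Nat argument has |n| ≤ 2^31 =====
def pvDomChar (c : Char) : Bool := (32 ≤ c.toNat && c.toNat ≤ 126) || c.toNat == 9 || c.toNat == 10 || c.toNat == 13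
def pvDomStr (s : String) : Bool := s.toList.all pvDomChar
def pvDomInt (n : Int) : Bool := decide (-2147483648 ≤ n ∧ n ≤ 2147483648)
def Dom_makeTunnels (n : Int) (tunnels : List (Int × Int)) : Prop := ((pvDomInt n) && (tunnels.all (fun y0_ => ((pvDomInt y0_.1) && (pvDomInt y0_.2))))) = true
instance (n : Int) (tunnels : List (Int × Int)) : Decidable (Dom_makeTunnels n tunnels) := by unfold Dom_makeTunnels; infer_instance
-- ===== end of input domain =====

-- B replaces A's adjacency-dict + recursive DFS component count by a quick-find label
-- array merged edge by edge (objective: alternative algorithm); return values agree on Pre_.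

-- ===== PORT A =====
def usingdfs : Nat → Int → PySem.Dict Int (List Int) → PySem.Set Int → PySem.Set Int
  | 0, _, _, visitednode => visitednode
  | (fuel+1), currnode, graph_network, visitednode =>
      (graph_network.getD currnode []).foldl
        (fun vis neighbor => if PySem.Set.contains vis neighbor then vis else usingdfs fuel neighbor graph_network vis)
        (PySem.Set.add visitednode currnode)

def makeTunnels (n : Int) (tunnels : List (Int × Int)) : Int :=
  let graph0 := (PySem.List.pyRange 0 n 1).foldl (fun g i => g.insert i ([] : List Int)) PySem.Dict.empty
  let graph := tunnels.foldl
      (fun g p => (g.modify p.1 [] (fun l => l ++ [p.2])).modify p.2 [] (fun l => l ++ [p.1])) graph0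
  let st := (PySem.List.pyRange 0 n 1).foldl
      (fun (st : PySem.Set Int × Int) ctr =>
        if PySem.Set.contains st.1 ctr then st else (usingdfs n.toNat ctr graph st.1, st.2 + 1))
      ((PySem.Set.empty : PySem.Set Int), (0 : Int))
  let moreTunnels := st.2 - 1
  if (tunnels.length : Int) < n - 1 then -1 else moreTunnels

-- ===== PORT B =====
def makeTunnels_alt (n : Int) (tunnels : List (Int × Int)) : Int :=
  let label := tunnels.foldl
    (fun lab p =>
      match PySem.List.pyGet? lab p.1, PySem.List.pyGet? lab p.2 with
      | some la, some lb => if la ≠ lb then lab.map (fun x => if x = lb then la else x) else lab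
      | _, _ => lab)
    (PySem.List.pyRange 0 n 1)
  let components : Int := (PySem.Set.ofList label).length
  if (tunnels.length : Int) < n - 1 then -1 else components - 1

-- ===== PRECONDITION & SPEC =====
-- Pre_ excludes exactly the inputs on which the Python A raises (KeyError: a tunnel
-- endpoint that is not a node of range(n)); A returns normally on all other inputs.
def Pre_makeTunnels (n : Int) (tunnels : List (Int × Int)) : Prop :=
  ∀ p ∈ tunnels, 0 ≤ p.1 ∧ p.1 < n ∧ 0 ≤ p.2 ∧ p.2 < n
instance (n : Int) (tunnels : List (Int × Int)) : Decidable (Pre_makeTunnels n tunnels) := by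
  unfold Pre_makeTunnels; infer_instance

def pvWitness_makeTunnels : Int × (List (Int × Int)) := (4, [(0, 1), (1, 2)])

def Spec_makeTunnels (n : Int) (tunnels : List (Int × Int)) (out : Int) : Prop := out = makeTunnels_alt n tunnels
instance (n : Int) (tunnels : List (Int × Int)) (out : Int) : Decidable (Spec_makeTunnels n tunnels out) := by unfold Spec_makeTunnels; infer_instance

-- ===== CLAIM (what is proved, stated in full; the proofs are below) =====
def Claim_equal_makeTunnels : Prop := ∀ (n : Int) (tunnels : List (Int × Int)), Dom_makeTunnels n tunnels → Pre_makeTunnels n tunnels → Spec_makeTunnels n tunnels (makeTunnels n tunnels)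

-- ===== LEMMAS AND PROOFS =====

def padj (E : List (Int × Int)) (u v : Int) : Prop := (u, v) ∈ E ∨ (v, u) ∈ E
def pconn (E : List (Int × Int)) : Int → Int → Prop := Relation.ReflTransGen (padj E)
theorem padj_symm {E : List (Int × Int)} {u v : Int} (h : padj E u v) : padj E v u := h.symm
theorem pconn_symm {E : List (Int × Int)} {u v : Int} (h : pconn E u v) : pconn E v u :=
  Relation.ReflTransGen.symmetric (fun _ _ h => padj_symm h) h
theorem padj_append_single {E : List (Int × Int)} {a b u v : Int} :
    padj (E ++ [(a, b)]) u v ↔ padj E u v ∨ (u = a ∧ v = b) ∨ (u = b ∧ v = a) := by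
  simp [padj, Prod.ext_iff]; tauto
theorem pconn_mono_append {E : List (Int × Int)} {e : Int × Int} {x y : Int} (h : pconn E x y) :
    pconn (E ++ [e]) x y :=
  Relation.ReflTransGen.mono (fun u v h => by cases h with
    | inl h => exact Or.inl (List.mem_append_left _ h)
    | inr h => exact Or.inr (List.mem_append_left _ h)) h
theorem pconn_append_single {E : List (Int × Int)} {a b x y : Int} :
    pconn (E ++ [(a, b)]) x y ↔
      pconn E x y ∨ (pconn E x a ∧ pconn E b y) ∨ (pconn E x b ∧ pconn E a y) := by
  constructor
  · intro h
    induction h with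
    | refl => exact Or.inl Relation.ReflTransGen.refl
    | tail hxy hadj ih =>
      rcases padj_append_single.mp hadj with h | ⟨rfl, rfl⟩ | ⟨rfl, rfl⟩
      · rcases ih with h1 | ⟨h1, h2⟩ | ⟨h1, h2⟩
        · exact Or.inl (h1.tail h)
        · exact Or.inr (Or.inl ⟨h1, h2.tail h⟩)
        · exact Or.inr (Or.inr ⟨h1, h2.tail h⟩)
      · rcases ih with h1 | ⟨h1, h2⟩ | ⟨h1, h2⟩
        · exact Or.inr (Or.inl ⟨h1, Relation.ReflTransGen.refl⟩)
        · -- pconn E x a, pconn E b a; target endpoint b: pconn E x b? no: use third: pconn x a ∧ ... target v = b: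
          -- need one of: pconn E x b / (pconn x a ∧ pconn b b) — second works
          exact Or.inr (Or.inl ⟨h1, Relation.ReflTransGen.refl⟩)
        · -- pconn E x b ∧ pconn E a a : third case with v = b? target: pconn (E++) x b: first: pconn E x b ✓
          exact Or.inl h1
      · rcases ih with h1 | ⟨h1, h2⟩ | ⟨h1, h2⟩
        · exact Or.inr (Or.inr ⟨h1, Relation.ReflTransGen.refl⟩)
        · exact Or.inl h1
        · exact Or.inr (Or.inr ⟨h1, Relation.ReflTransGen.refl⟩)
  · intro h
    rcases h with h | ⟨h1, h2⟩ | ⟨h1, h2⟩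
    · exact pconn_mono_append h
    · exact ((pconn_mono_append h1).tail
        (padj_append_single.mpr (Or.inr (Or.inl ⟨rfl, rfl⟩)))).trans (pconn_mono_append h2)
    · exact ((pconn_mono_append h1).tail
        (padj_append_single.mpr (Or.inr (Or.inr ⟨rfl, rfl⟩)))).trans (pconn_mono_append h2)
def bstep : List Int → (Int × Int) → List Int := fun lab p =>
  match PySem.List.pyGet? lab p.1, PySem.List.pyGet? lab p.2 with
  | some la, some lb => if la ≠ lb then lab.map (fun x => if x = lb then la else x) else lab
  | _, _ => lab
def range0 (n : Int) : List Int := PySem.List.pyRange 0 n 1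

theorem pconn_nil {u v : Int} : pconn [] u v ↔ u = v := by
  constructor
  · intro h; induction h with
    | refl => rfl
    | tail _ hadj ih => cases hadj with
      | inl h => simp at h
      | inr h => simp at h
  · rintro rfl; exact Relation.ReflTransGen.refl

theorem blabel_spec (n : Int) : ∀ (E : List (Int × Int)),
    (∀ p ∈ E, 0 ≤ p.1 ∧ p.1 < n ∧ 0 ≤ p.2 ∧ p.2 < n) →
    (E.foldl bstep (range0 n)).length = n.toNat ∧
    ∀ i j : Nat, i < n.toNat → j < n.toNat →
      ((E.foldl bstep (range0 n)).getD i 0 = (E.foldl bstep (range0 n)).getD j 0 ↔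
        pconn E (i : Int) (j : Int)) := by
  intro E
  induction E using List.reverseRecOn with
  | nil =>
    intro _
    have hlen0 : (range0 n).length = n.toNat := by
      simp [range0, PySem.List.length_pyRange_one]
    have hget : ∀ k : Nat, k < n.toNat → (range0 n).getD k 0 = (k : Int) := by
      intro k hk
      rw [List.getD_eq_getElem _ _ (by omega)]
      unfold range0
      rw [PySem.List.getElem_pyRange_one]
      simp
    constructor
    · simpa using hlen0
    · intro i j hi hj
      simp only [List.foldl_nil, hget i hi, hget j hj, pconn_nil]
  | append_singleton E e ih =>
    intro hE
    obtain ⟨a, b⟩ := e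
    have hab := hE (a, b) (by simp)
    obtain ⟨ha0, han, hb0, hbn⟩ := hab
    have hE' : ∀ p ∈ E, 0 ≤ p.1 ∧ p.1 < n ∧ 0 ≤ p.2 ∧ p.2 < n :=
      fun p hp => hE p (List.mem_append_left _ hp)
    obtain ⟨hlen, hfib⟩ := ih hE'
    set L := E.foldl bstep (range0 n) with hL
    have hA : (a.toNat : Int) = a := Int.toNat_of_nonneg ha0
    have hB : (b.toNat : Int) = b := Int.toNat_of_nonneg hb0
    have hAlt : a.toNat < n.toNat := by omega
    have hBlt : b.toNat < n.toNat := by omega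
    have hga : PySem.List.pyGet? L a = some (L.getD a.toNat 0) := by
      rw [PySem.List.pyGet?_of_nonneg L ha0, List.getElem?_eq_getElem (by omega),
        List.getD_eq_getElem _ _ (by omega)]
    have hgb : PySem.List.pyGet? L b = some (L.getD b.toNat 0) := by
      rw [PySem.List.pyGet?_of_nonneg L hb0, List.getElem?_eq_getElem (by omega),
        List.getD_eq_getElem _ _ (by omega)]
    set la := L.getD a.toNat 0 with hla
    set lb := L.getD b.toNat 0 with hlb
    have hfold : (E ++ [(a, b)]).foldl bstep (range0 n) = bstep L (a, b) := by
      rw [List.foldl_append]; simp [hL]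
    have hconnab : la = lb ↔ pconn E a b := by
      rw [← hA, ← hB]; exact hfib a.toNat b.toNat hAlt hBlt
    by_cases hcase : la = lb
    · have hb2 : bstep L (a, b) = L := by
        simp only [bstep, hga, hgb]; simp [hcase]
      rw [hfold, hb2]
      refine ⟨hlen, fun i j hi hj => ?_⟩
      rw [hfib i j hi hj, pconn_append_single]
      have hab' : pconn E a b := hconnab.mp hcase
      constructor
      · exact Or.inl
      · rintro (h | ⟨h1, h2⟩ | ⟨h1, h2⟩)
        · exact h
        · exact (h1.trans hab').trans h2
        · exact (h1.trans (pconn_symm hab')).trans h2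
    · have hb2 : bstep L (a, b) = L.map (fun x => if x = lb then la else x) := by
        simp only [bstep, hga, hgb]; simp [hcase]
      rw [hfold, hb2]
      have hlen' : (L.map (fun x => if x = lb then la else x)).length = n.toNat := by
        simpa using hlen
      refine ⟨hlen', fun i j hi hj => ?_⟩
      have hmap : ∀ k : Nat, k < n.toNat →
          (L.map (fun x => if x = lb then la else x)).getD k 0 =
            (if L.getD k 0 = lb then la else L.getD k 0) := by
        intro k hk
        rw [List.getD_eq_getElem _ _ (by omega : k < (L.map _).length)]
        rw [List.getElem_map, List.getD_eq_getElem _ _ (by omega)]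
      rw [hmap i hi, hmap j hj, pconn_append_single]
      have e1 : pconn E (i : Int) (j : Int) ↔ L.getD i 0 = L.getD j 0 := (hfib i j hi hj).symm
      have e2 : pconn E (i : Int) a ↔ L.getD i 0 = la := by
        rw [← hA]; exact (hfib i a.toNat hi hAlt).symm
      have e3 : pconn E b (j : Int) ↔ lb = L.getD j 0 := by
        rw [← hB]; exact (hfib b.toNat j hBlt hj).symm
      have e4 : pconn E (i : Int) b ↔ L.getD i 0 = lb := by
        rw [← hB]; exact (hfib i b.toNat hi hBlt).symm
      have e5 : pconn E a (j : Int) ↔ la = L.getD j 0 := by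
        rw [← hA]; exact (hfib a.toNat j hAlt hj).symm
      rw [e1, e2, e3, e4, e5]
      split_ifs <;> omega

def gstep : PySem.Dict Int (List Int) → Int × Int → PySem.Dict Int (List Int) := fun g p =>
  (g.modify p.1 [] (fun l => l ++ [p.2])).modify p.2 [] (fun l => l ++ [p.1])

def dstep (fuel : Nat) (g : PySem.Dict Int (List Int)) : PySem.Set Int → Int → PySem.Set Int :=
  fun vis neighbor => if PySem.Set.contains vis neighbor then vis else usingdfs fuel neighbor g vis

theorem usingdfs_succ (fuel : Nat) (c : Int) (g : PySem.Dict Int (List Int)) (V : PySem.Set Int) :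
    usingdfs (fuel+1) c g V = (g.getD c []).foldl (dstep fuel g) (PySem.Set.add V c) := rfl

theorem foldl_insert_getD : ∀ (l : List Int) (g : PySem.Dict Int (List Int)),
    (∀ c, g.getD c [] = []) → ∀ c, (l.foldl (fun g i => g.insert i ([] : List Int)) g).getD c [] = [] := by
  intro l
  induction l with
  | nil => intro g h c; exact h c
  | cons i l ih =>
    intro g h c
    rw [List.foldl_cons]
    refine ih _ (fun c' => ?_) c
    rw [PySem.Dict.getD_insert]
    split_ifs with h' <;> [rfl; exact h c']

theorem graphE_mem : ∀ (E : List (Int × Int)) (g : PySem.Dict Int (List Int)) (c b : Int),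
    b ∈ (E.foldl gstep g).getD c [] ↔ b ∈ g.getD c [] ∨ (c, b) ∈ E ∨ (b, c) ∈ E := by
  intro E
  induction E with
  | nil => simp
  | cons p E ih =>
    intro g c b
    rw [List.foldl_cons, ih]
    have hg : (gstep g p).getD c [] =
        (if c = p.2 then ((if p.2 = p.1 then g.getD p.1 [] ++ [p.2] else g.getD p.2 []) ++ [p.1])
         else (if c = p.1 then g.getD p.1 [] ++ [p.2] else g.getD c [])) := by
      unfold gstep
      simp only [PySem.Dict.getD_modify]
    rw [hg]
    simp only [List.mem_cons, Prod.ext_iff]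
    split_ifs with h1 h2 h2 <;> simp_all <;> tauto

theorem foldl_step_mono (f : PySem.Set Int → Int → PySem.Set Int)
    (hf : ∀ s a x, x ∈ s → x ∈ f s a) :
    ∀ (l : List Int) (s : PySem.Set Int) (x : Int), x ∈ s → x ∈ l.foldl f s := by
  intro l
  induction l with
  | nil => intro s x hx; simpa using hx
  | cons a l ih => intro s x hx; rw [List.foldl_cons]; exact ih _ x (hf s a x hx)

theorem dfs_mono : ∀ (fuel : Nat) (c : Int) (g : PySem.Dict Int (List Int)) (V : PySem.Set Int)
    (x : Int), x ∈ V → x ∈ usingdfs fuel c g V := by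
  intro fuel
  induction fuel with
  | zero => intro c g V x hx; simpa [usingdfs] using hx
  | succ fuel ih =>
    intro c g V x hx
    rw [usingdfs_succ]
    refine foldl_step_mono _ ?_ _ _ x (by simp [PySem.Set.mem_add, hx])
    intro s a y hy
    unfold dstep
    split_ifs with hc
    · exact hy
    · exact ih a g s y hy

theorem dstep_mono (fuel : Nat) (g : PySem.Dict Int (List Int)) :
    ∀ (s : PySem.Set Int) (a x : Int), x ∈ s → x ∈ dstep fuel g s a := by
  intro s a x hx
  unfold dstep
  split_ifs with hc
  · exact hx
  · exact dfs_mono fuel a g s x hx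

theorem dstep_of_mem {fuel : Nat} {g : PySem.Dict Int (List Int)} {acc : PySem.Set Int}
    {nb : Int} (h : nb ∈ acc) : dstep fuel g acc nb = acc := by
  unfold dstep; rw [if_pos ((PySem.Set.contains_iff _ _).mpr h)]

theorem dstep_of_not_mem {fuel : Nat} {g : PySem.Dict Int (List Int)} {acc : PySem.Set Int}
    {nb : Int} (h : nb ∉ acc) : dstep fuel g acc nb = usingdfs fuel nb g acc := by
  unfold dstep; rw [if_neg (fun hc => h ((PySem.Set.contains_iff _ _).mp hc))]

theorem dfs_self (fuel : Nat) (c : Int) (g : PySem.Dict Int (List Int)) (V : PySem.Set Int)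
    (h : 1 ≤ fuel) : c ∈ usingdfs fuel c g V := by
  obtain ⟨fuel, rfl⟩ : ∃ f', fuel = f' + 1 := ⟨fuel - 1, by omega⟩
  rw [usingdfs_succ]
  exact foldl_step_mono _ (dstep_mono fuel g) _ _ c (by simp [PySem.Set.mem_add])

def reach (E : List (Int × Int)) (V : List Int) : Int → Int → Prop :=
  Relation.ReflTransGen (fun u v => padj E u v ∧ v ∉ V)

theorem reach_pconn {E : List (Int × Int)} {V : List Int} {c x : Int} (h : reach E V c x) :
    pconn E c x := Relation.ReflTransGen.mono (fun _ _ h => h.1) h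

theorem dfs_sound (E : List (Int × Int)) (g : PySem.Dict Int (List Int))
    (hG : ∀ c b, b ∈ g.getD c [] ↔ padj E c b) :
    ∀ (fuel : Nat) (c : Int) (V : PySem.Set Int) (x : Int),
      x ∈ usingdfs fuel c g V → x ∈ V ∨ reach E V c x := by
  intro fuel
  induction fuel with
  | zero => intro c V x hx; exact Or.inl (by simpa [usingdfs] using hx)
  | succ fuel ih =>
    intro c V x hx
    rw [usingdfs_succ] at hx
    have aux : ∀ (l : List Int), (∀ nb ∈ l, padj E c nb) → ∀ (acc : PySem.Set Int),
        (∀ z ∈ acc, z ∈ V ∨ reach E V c z) → (∀ z, z ∈ V → z ∈ acc) →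
        ∀ y, y ∈ l.foldl (dstep fuel g) acc → y ∈ V ∨ reach E V c y := by
      intro l
      induction l with
      | nil => intro _ acc hacc _ y hy; exact hacc y (by simpa using hy)
      | cons nb l ihl =>
        intro hl acc hacc hVacc y hy
        rw [List.foldl_cons] at hy
        by_cases hc : nb ∈ acc
        · rw [dstep_of_mem hc] at hy
          exact ihl (fun nb' h => hl nb' (List.mem_cons_of_mem _ h)) acc hacc hVacc y hy
        · rw [dstep_of_not_mem hc] at hy
          have hnbV : nb ∉ V := fun h => hc (hVacc nb h)
          have r1 : reach E V c nb :=
            Relation.ReflTransGen.single ⟨hl nb List.mem_cons_self, hnbV⟩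
          refine ihl (fun nb' h => hl nb' (List.mem_cons_of_mem _ h)) _ ?_ ?_ y hy
          · intro z hz
            rcases ih nb acc z hz with hz' | hr
            · exact hacc z hz'
            · refine Or.inr (r1.trans ?_)
              exact Relation.ReflTransGen.mono
                (fun u v hv => ⟨hv.1, fun hm => hv.2 (hVacc v hm)⟩) hr
          · intro z hz; exact dfs_mono fuel nb g acc z (hVacc z hz)
    refine aux _ (fun nb h => (hG c nb).mp h) _ ?_ ?_ x hx
    · intro z hz
      rcases (PySem.Set.mem_add _ _ _).mp hz with hz' | rfl
      · exact Or.inl hz'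
      · exact Or.inr Relation.ReflTransGen.refl
    · intro z hz; exact (PySem.Set.mem_add _ _ _).mpr (Or.inl hz)

def VC (n : Int) (V : List Int) : Nat :=
  ((Finset.range n.toNat).filter (fun k : Nat => (k : Int) ∈ V)).card

theorem VC_mono (n : Int) (V W : List Int) (h : ∀ x ∈ V, x ∈ W) : VC n V ≤ VC n W := by
  refine Finset.card_le_card (fun k hk => ?_)
  simp only [Finset.mem_filter, Finset.mem_range] at *
  exact ⟨hk.1, h _ hk.2⟩

theorem VC_lt (n : Int) (V : List Int) (c : Int) (h0 : 0 ≤ c) (h1 : c < n) (hc : c ∉ V) :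
    VC n V < n.toNat := by
  have hsub : (Finset.range n.toNat).filter (fun k : Nat => (k : Int) ∈ V) ⊂ Finset.range n.toNat := by
    refine Finset.filter_ssubset.mpr ⟨c.toNat, ?_, ?_⟩
    · simp only [Finset.mem_range]; omega
    · rw [Int.toNat_of_nonneg h0]; exact hc
  simpa using Finset.card_lt_card hsub

theorem VC_add (n : Int) (V : List Int) (c : Int) (h0 : 0 ≤ c) (h1 : c < n) (hc : c ∉ V) :
    VC n V + 1 ≤ VC n (PySem.Set.add V c) := by
  have hins : insert c.toNat ((Finset.range n.toNat).filter (fun k : Nat => (k : Int) ∈ V)) ⊆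
      (Finset.range n.toNat).filter (fun k : Nat => (k : Int) ∈ PySem.Set.add V c) := by
    intro k hk
    simp only [Finset.mem_insert, Finset.mem_filter, Finset.mem_range] at *
    rcases hk with rfl | ⟨hk1, hk2⟩
    · exact ⟨by omega, (PySem.Set.mem_add _ _ _).mpr (Or.inr (Int.toNat_of_nonneg h0))⟩
    · exact ⟨hk1, (PySem.Set.mem_add _ _ _).mpr (Or.inl hk2)⟩
  have hnot : c.toNat ∉ (Finset.range n.toNat).filter (fun k : Nat => (k : Int) ∈ V) := by
    simp only [Finset.mem_filter, Finset.mem_range, Int.toNat_of_nonneg h0]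
    tauto
  calc VC n V + 1 = (insert c.toNat ((Finset.range n.toNat).filter (fun k : Nat => (k : Int) ∈ V))).card := by
        unfold VC; rw [Finset.card_insert_of_notMem hnot]
    _ ≤ _ := Finset.card_le_card hins

theorem padj_bounds {n : Int} {E : List (Int × Int)}
    (hE : ∀ p ∈ E, 0 ≤ p.1 ∧ p.1 < n ∧ 0 ≤ p.2 ∧ p.2 < n) {u v : Int} (h : padj E u v) :
    (0 ≤ u ∧ u < n) ∧ (0 ≤ v ∧ v < n) := by
  rcases h with h | h <;> have := hE _ h <;> simp_all

theorem dfs_closed (n : Int) (E : List (Int × Int)) (g : PySem.Dict Int (List Int))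
    (hG : ∀ c b, b ∈ g.getD c [] ↔ padj E c b)
    (hE : ∀ p ∈ E, 0 ≤ p.1 ∧ p.1 < n ∧ 0 ≤ p.2 ∧ p.2 < n) :
    ∀ (fuel : Nat) (c : Int) (V : PySem.Set Int), 0 ≤ c → c < n → c ∉ V →
      n.toNat - VC n V ≤ fuel →
      (∀ nb ∈ g.getD c [], nb ∈ usingdfs fuel c g V) ∧
      (∀ x y, x ∈ usingdfs fuel c g V → x ∉ V → padj E x y → y ∈ usingdfs fuel c g V) := by
  intro fuel
  induction fuel with
  | zero =>
    intro c V h0 h1 hcV hfuel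
    exact absurd hfuel (by have := VC_lt n V c h0 h1 hcV; omega)
  | succ fuel ih =>
    intro c V h0 h1 hcV hfuel
    rw [usingdfs_succ]
    have main : ∀ (l : List Int), (∀ nb ∈ l, padj E c nb) → ∀ (acc : PySem.Set Int),
        (∀ z ∈ V, z ∈ acc) → c ∈ acc → VC n V + 1 ≤ VC n acc →
        (∀ x y, x ∈ acc → x ∉ V → x ≠ c → padj E x y → y ∈ acc) →
        (((∀ z ∈ V, z ∈ l.foldl (dstep fuel g) acc) ∧ c ∈ l.foldl (dstep fuel g) acc ∧
          VC n V + 1 ≤ VC n (l.foldl (dstep fuel g) acc) ∧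
          (∀ x y, x ∈ l.foldl (dstep fuel g) acc → x ∉ V → x ≠ c → padj E x y →
            y ∈ l.foldl (dstep fuel g) acc)) ∧
         (∀ nb ∈ l, nb ∈ l.foldl (dstep fuel g) acc)) := by
      intro l
      induction l with
      | nil =>
        intro _ acc h1' h2' h3' h4'
        refine ⟨⟨by simpa using h1', by simpa using h2', by simpa using h3', ?_⟩, by simp⟩
        simpa using h4'
      | cons nb l ihl =>
        intro hl acc hVacc hcacc hVC hcl
        rw [List.foldl_cons]
        by_cases hmem : nb ∈ acc
        · rw [dstep_of_mem hmem]
          obtain ⟨hInv, hrest⟩ := ihl (fun x h => hl x (List.mem_cons_of_mem _ h)) acc hVacc hcacc hVC hcl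
          refine ⟨hInv, ?_⟩
          intro nb' hnb'
          rcases List.mem_cons.mp hnb' with rfl | h
          · exact foldl_step_mono _ (dstep_mono fuel g) _ _ _ hmem
          · exact hrest nb' h
        · rw [dstep_of_not_mem hmem]
          have hadjnb : padj E c nb := hl nb List.mem_cons_self
          have hb := (padj_bounds hE hadjnb).2
          have hsub : n.toNat - VC n acc ≤ fuel := by
            have := hfuel; omega
          obtain ⟨hnbrs', hclosed'⟩ := ih nb acc hb.1 hb.2 hmem hsub
          have hfuel1 : 1 ≤ fuel := by
            have := VC_lt n acc nb hb.1 hb.2 hmem; omega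
          have hnbacc' : nb ∈ usingdfs fuel nb g acc := dfs_self fuel nb g acc hfuel1
          obtain ⟨hInv, hrest⟩ := ihl (fun x h => hl x (List.mem_cons_of_mem _ h))
            (usingdfs fuel nb g acc)
            (fun z hz => dfs_mono fuel nb g acc z (hVacc z hz))
            (dfs_mono fuel nb g acc c hcacc)
            (le_trans hVC (VC_mono n _ _ (fun z hz => dfs_mono fuel nb g acc z hz)))
            (by
              intro x y hx hxV hxc hadj
              by_cases hxacc : x ∈ acc
              · exact dfs_mono fuel nb g acc y (hcl x y hxacc hxV hxc hadj)
              · exact hclosed' x y hx hxacc hadj)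
          refine ⟨hInv, ?_⟩
          intro nb' hnb'
          rcases List.mem_cons.mp hnb' with rfl | h
          · exact foldl_step_mono _ (dstep_mono fuel g) _ _ _ hnbacc'
          · exact hrest nb' h
    obtain ⟨⟨hV', hc', hVC', hcl'⟩, hnbrs⟩ := main (g.getD c [])
      (fun nb h => (hG c nb).mp h) (PySem.Set.add V c)
      (fun z hz => (PySem.Set.mem_add _ _ _).mpr (Or.inl hz))
      ((PySem.Set.mem_add _ _ _).mpr (Or.inr rfl))
      (VC_add n V c h0 h1 hcV)
      (by
        intro x y hx hxV hxc hadj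
        rcases (PySem.Set.mem_add _ _ _).mp hx with h | h
        · exact absurd h hxV
        · exact absurd h hxc)
    refine ⟨hnbrs, ?_⟩
    intro x y hx hxV hadj
    by_cases hxc : x = c
    · subst hxc
      exact hnbrs y ((hG x y).mpr hadj)
    · exact hcl' x y hx hxV hxc hadj

theorem dfs_component (n : Int) (E : List (Int × Int)) (g : PySem.Dict Int (List Int))
    (hG : ∀ c b, b ∈ g.getD c [] ↔ padj E c b)
    (hE : ∀ p ∈ E, 0 ≤ p.1 ∧ p.1 < n ∧ 0 ≤ p.2 ∧ p.2 < n)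
    (V : PySem.Set Int) (hVc : ∀ x y, x ∈ V → padj E x y → y ∈ V)
    (c : Int) (h0 : 0 ≤ c) (h1 : c < n) (hcV : c ∉ V) :
    ∀ x, x ∈ usingdfs n.toNat c g V ↔ (x ∈ V ∨ pconn E c x) := by
  have hfuel : n.toNat - VC n V ≤ n.toNat := by omega
  obtain ⟨hnbrs, hclosed⟩ := dfs_closed n E g hG hE n.toNat c V h0 h1 hcV hfuel
  intro x
  constructor
  · intro hx
    rcases dfs_sound E g hG n.toNat c V x hx with h | h
    · exact Or.inl h
    · exact Or.inr (reach_pconn h)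
  · rintro (h | h)
    · exact dfs_mono _ c g V x h
    · have hfuel1 : 1 ≤ n.toNat := by have := VC_lt n V c h0 h1 hcV; omega
      induction h with
      | refl => exact dfs_self _ c g V hfuel1
      | tail hcy hadj ihy =>
        rename_i y z
        by_cases hyV : y ∈ V
        · exact dfs_mono _ c g V z (hVc y z hyV hadj)
        · exact hclosed y z ihy hyV hadj

def ostep (N : Nat) (g : PySem.Dict Int (List Int)) :
    (PySem.Set Int × Int) → Int → (PySem.Set Int × Int) := fun st ctr =>
  if PySem.Set.contains st.1 ctr then st else (usingdfs N ctr g st.1, st.2 + 1)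

def labf (n : Int) (E : List (Int × Int)) (k : Nat) : Int := (E.foldl bstep (range0 n)).getD k 0

theorem outer_spec (n : Int) (E : List (Int × Int)) (g : PySem.Dict Int (List Int))
    (hG : ∀ c b, b ∈ g.getD c [] ↔ padj E c b)
    (hE : ∀ p ∈ E, 0 ≤ p.1 ∧ p.1 < n ∧ 0 ≤ p.2 ∧ p.2 < n) :
    ∀ K : Nat, K ≤ n.toNat →
      (∀ x, x ∈ ((PySem.List.pyRange 0 (K : Int) 1).foldl (ostep n.toNat g)
          (PySem.Set.empty, 0)).1 ↔ ∃ c' : Nat, c' < K ∧ pconn E (c' : Int) x) ∧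
      ((PySem.List.pyRange 0 (K : Int) 1).foldl (ostep n.toNat g) (PySem.Set.empty, 0)).2 =
        (((Finset.range K).image (labf n E)).card : Int) := by
  have hfib : ∀ i j : Nat, i < n.toNat → j < n.toNat →
      (labf n E i = labf n E j ↔ pconn E (i : Int) (j : Int)) := (blabel_spec n E hE).2
  intro K
  induction K with
  | zero =>
    intro _
    rw [show ((0 : Nat) : Int) = 0 by rfl, PySem.List.pyRange_one_eq_nil (by omega)]
    constructor
    · intro x; simp [PySem.Set.empty]
    · simp
  | succ K ihK =>
    intro hK1
    obtain ⟨hmem, hcomp⟩ := ihK (by omega)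
    have hKN : K < n.toNat := by omega
    have hKn : (K : Int) < n := by
      have : ((K : Nat) : Int) < (n.toNat : Int) := by exact_mod_cast hKN
      omega
    rw [show ((K + 1 : Nat) : Int) = (K : Int) + 1 by push_cast; ring,
      PySem.List.pyRange_one_succ_right (by positivity), List.foldl_append, List.foldl_cons,
      List.foldl_nil]
    set st := (PySem.List.pyRange 0 (K : Int) 1).foldl (ostep n.toNat g)
      ((PySem.Set.empty : PySem.Set Int), (0 : Int)) with hst
    have hVc : ∀ x y, x ∈ st.1 → padj E x y → y ∈ st.1 := by
      intro x y hx hadj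
      obtain ⟨c', hc', hp⟩ := (hmem x).mp hx
      exact (hmem y).mpr ⟨c', hc', hp.tail hadj⟩
    by_cases hv : (K : Int) ∈ st.1
    · rw [show ostep n.toNat g st (K : Int) = st by
        unfold ostep; rw [if_pos ((PySem.Set.contains_iff _ _).mpr hv)]]
      obtain ⟨c0, hc0, hp0⟩ := (hmem (K : Int)).mp hv
      constructor
      · intro x
        rw [hmem x]
        constructor
        · rintro ⟨c', hc', hp⟩; exact ⟨c', by omega, hp⟩
        · rintro ⟨c', hc', hp⟩
          rcases Nat.lt_succ_iff_lt_or_eq.mp hc' with h | rfl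
          · exact ⟨c', h, hp⟩
          · exact ⟨c0, hc0, hp0.trans hp⟩
      · rw [hcomp, Finset.range_add_one, Finset.image_insert]
        have : labf n E K ∈ (Finset.range K).image (labf n E) := by
          refine Finset.mem_image.mpr ⟨c0, Finset.mem_range.mpr hc0, ?_⟩
          exact (hfib c0 K (by omega) hKN).mpr hp0
        rw [Finset.insert_eq_self.mpr this]
    · rw [show ostep n.toNat g st (K : Int) = (usingdfs n.toNat (K : Int) g st.1, st.2 + 1) by
        unfold ostep; rw [if_neg (fun hc => hv ((PySem.Set.contains_iff _ _).mp hc))]]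
      have hdfs := dfs_component n E g hG hE st.1 hVc (K : Int) (by positivity) hKn hv
      constructor
      · intro x
        rw [show (usingdfs n.toNat (K : Int) g st.1, st.2 + 1).1 = usingdfs n.toNat (K : Int) g st.1 from rfl,
          hdfs x, hmem x]
        constructor
        · rintro (⟨c', hc', hp⟩ | hp)
          · exact ⟨c', by omega, hp⟩
          · exact ⟨K, by omega, hp⟩
        · rintro ⟨c', hc', hp⟩
          rcases Nat.lt_succ_iff_lt_or_eq.mp hc' with h | rfl
          · exact Or.inl ⟨c', h, hp⟩
          · exact Or.inr hp
      · show st.2 + 1 = _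
        rw [hcomp, Finset.range_add_one, Finset.image_insert]
        have hnotmem : labf n E K ∉ (Finset.range K).image (labf n E) := by
          intro hmem'
          obtain ⟨c', hc', heq⟩ := Finset.mem_image.mp hmem'
          rw [Finset.mem_range] at hc'
          exact hv ((hmem (K : Int)).mpr ⟨c', hc', (hfib c' K (by omega) hKN).mp heq⟩)
        rw [Finset.card_insert_of_notMem hnotmem]
        push_cast
        ring

theorem makeTunnels_eq (n : Int) (tunnels : List (Int × Int)) :
    makeTunnels n tunnels =
      (if (tunnels.length : Int) < n - 1 then -1 else
        ((PySem.List.pyRange 0 n 1).foldl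
          (ostep n.toNat (tunnels.foldl gstep
            ((PySem.List.pyRange 0 n 1).foldl (fun g i => g.insert i ([] : List Int)) PySem.Dict.empty)))
          ((PySem.Set.empty : PySem.Set Int), (0 : Int))).2 - 1) := rfl

theorem makeTunnels_alt_eq (n : Int) (tunnels : List (Int × Int)) :
    makeTunnels_alt n tunnels =
      (if (tunnels.length : Int) < n - 1 then -1 else
        ((PySem.Set.ofList (tunnels.foldl bstep (range0 n))).length : Int) - 1) := rfl

theorem pyRange_toNat (n : Int) :
    PySem.List.pyRange 0 n 1 = PySem.List.pyRange 0 ((n.toNat : Int)) 1 := by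
  have h : (n - 0).toNat = ((n.toNat : Int) - 0).toNat := by omega
  rw [PySem.List.pyRange_one, PySem.List.pyRange_one, h]

theorem ofList_length_toFinset (l : List Int) :
    (PySem.Set.ofList l).length = l.toFinset.card := by
  have hnd := PySem.Set.nodup_ofList l
  have : (PySem.Set.ofList l : List Int).toFinset = l.toFinset := by
    apply Finset.ext
    intro x
    simp [List.mem_toFinset, PySem.Set.mem_ofList]
  rw [← this, List.toFinset_card_of_nodup hnd]

theorem label_toFinset (n : Int) (E : List (Int × Int))
    (hE : ∀ p ∈ E, 0 ≤ p.1 ∧ p.1 < n ∧ 0 ≤ p.2 ∧ p.2 < n) :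
    (E.foldl bstep (range0 n)).toFinset = (Finset.range n.toNat).image (labf n E) := by
  obtain ⟨hlen, _⟩ := blabel_spec n E hE
  apply Finset.ext
  intro x
  simp only [List.mem_toFinset, Finset.mem_image, Finset.mem_range]
  constructor
  · intro hx
    obtain ⟨k, hk, hget⟩ := List.mem_iff_getElem.mp hx
    refine ⟨k, by omega, ?_⟩
    unfold labf
    rw [List.getD_eq_getElem _ _ hk, hget]
  · rintro ⟨k, hk, hget⟩
    rw [← hget]
    unfold labf
    rw [List.getD_eq_getElem _ _ (by omega)]
    exact List.getElem_mem _

theorem makeTunnels_spec' (n : Int) (tunnels : List (Int × Int))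
    (hPre : ∀ p ∈ tunnels, 0 ≤ p.1 ∧ p.1 < n ∧ 0 ≤ p.2 ∧ p.2 < n) :
    makeTunnels n tunnels = makeTunnels_alt n tunnels := by
  rw [makeTunnels_eq, makeTunnels_alt_eq]
  by_cases hguard : (tunnels.length : Int) < n - 1
  · rw [if_pos hguard, if_pos hguard]
  · rw [if_neg hguard, if_neg hguard]
    have hG : ∀ (l : List Int) (c b : Int), b ∈ (tunnels.foldl gstep
        (l.foldl (fun g i => g.insert i ([] : List Int)) PySem.Dict.empty)).getD c [] ↔
        padj tunnels c b := by
      intro l c b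
      rw [graphE_mem]
      have h0 : ∀ c', (l.foldl (fun g i => g.insert i ([] : List Int))
          PySem.Dict.empty).getD c' [] = [] := by
        intro c'
        exact foldl_insert_getD _ _ (fun c'' => by simp [PySem.Dict.getD_empty]) c'
      rw [h0]
      simp [padj]
    rw [pyRange_toNat n]
    obtain ⟨_, hcomp⟩ := outer_spec n tunnels _ (hG (PySem.List.pyRange 0 ((n.toNat : Int)) 1)) hPre n.toNat le_rfl
    rw [hcomp]
    congr 1
    rw [ofList_length_toFinset, label_toFinset n tunnels hPre]

-- ===== VERDICT (by name: the statement is the Claim_ definition above) =====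
theorem makeTunnels_spec : Claim_equal_makeTunnels := by
  intro n tunnels _ hPre
  unfold Spec_makeTunnels
  exact makeTunnels_spec' n tunnels hPre
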